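-- pv_equiv track=rewrite | github.com/RyeMcKenzie81/ryan-viral-pattern-detector | viraltracker/ui/pages/65_📜_History.py | get_message_summary
-- ===== SOURCE A (Python) =====
-- from typing import List, Dict, Any
--
-- def get_message_summary(messages: List[Dict[str, Any]]) -> Dict[str, int]:
--     """Get summary statistics for messages"""
--     user_msgs = sum(1 for m in messages if m.get("role") == "user")
--     assistant_msgs = sum(1 for m in messages if m.get("role") == "assistant")
--     structured_results = sum(1 for m in messages if "structured_data" in m)
--
--     return {
--         "total": len(messages),
--         "user": user_msgs,
--         "assistant": assistant_msgs,
--         "structured_results": structured_results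
--     }
-- ===== SOURCE B (Python) =====
-- def get_message_summary(messages):
--     """Get summary statistics for messages (single pass with counters)"""
--     user = 0
--     assistant = 0
--     structured = 0
--     for m in messages:
--         r = m.get("role")
--         if r == "user":
--             user += 1
--         elif r == "assistant":
--             assistant += 1
--         if "structured_data" in m:
--             structured += 1
--     return {
--         "total": len(messages),
--         "user": user,
--         "assistant": assistant,
--         "structured_results": structured
--     }
-- ===== Notes on version B (the rewrite author's own statement) =====
-- stated objective: alternative
-- what changed: Replaces A's three separate generator-expression scans of the message list with a single explicit loop maintaining user/assistant/structured counters (using elif for the mutually exclusive role cases).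
import Mathlib
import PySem

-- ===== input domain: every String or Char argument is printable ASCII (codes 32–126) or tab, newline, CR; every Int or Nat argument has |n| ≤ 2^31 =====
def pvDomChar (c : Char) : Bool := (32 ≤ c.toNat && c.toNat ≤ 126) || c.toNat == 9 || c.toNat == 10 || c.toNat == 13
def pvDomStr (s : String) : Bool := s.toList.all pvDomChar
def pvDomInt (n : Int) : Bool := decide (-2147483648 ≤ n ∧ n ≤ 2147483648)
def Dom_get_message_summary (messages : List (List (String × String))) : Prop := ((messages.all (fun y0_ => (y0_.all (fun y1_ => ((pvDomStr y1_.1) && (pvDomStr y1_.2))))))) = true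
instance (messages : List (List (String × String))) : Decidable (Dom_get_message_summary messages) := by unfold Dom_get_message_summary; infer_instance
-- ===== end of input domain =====

-- B: one explicit loop with counters instead of A's three separate scans (alternative decomposition; return value only).
-- ===== PORT A =====
-- m.get(k) on a Python dict = first match in the association list
def pvDictGet (m : List (String × String)) (k : String) : Option String :=
  (m.find? (fun p => p.1 == k)).map (·.2)

def get_message_summary (messages : List (List (String × String))) : List (String × Int) :=
  let user_msgs := messages.foldl (fun acc m => acc + (if pvDictGet m "role" == some "user" then 1 else 0)) 0
  let assistant_msgs := messages.foldl (fun acc m => acc + (if pvDictGet m "role" == some "assistant" then 1 else 0)) 0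
  let structured_results := messages.foldl (fun acc m => acc + (if m.any (fun p => p.1 == "structured_data") then 1 else 0)) 0
  [("total", (messages.length : Int)), ("user", user_msgs),
   ("assistant", assistant_msgs), ("structured_results", structured_results)]

-- ===== PORT B =====
def altLoop : List (List (String × String)) → Int → Int → Int → Int × Int × Int
  | [], u, a, s => (u, a, s)
  | m :: rest, u, a, s =>
      let r := pvDictGet m "role"
      let u' := if r == some "user" then u + 1 else u
      let a' := if r == some "user" then a else if r == some "assistant" then a + 1 else a
      let s' := if m.any (fun p => p.1 == "structured_data") then s + 1 else s
      altLoop rest u' a' s'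

def get_message_summary_alt (messages : List (List (String × String))) : List (String × Int) :=
  let (u, a, s) := altLoop messages 0 0 0
  [("total", (messages.length : Int)), ("user", u), ("assistant", a), ("structured_results", s)]

-- ===== PRECONDITION & SPEC =====
def Spec_get_message_summary (messages : List (List (String × String))) (out : List (String × Int)) : Prop := out = get_message_summary_alt messages
instance (messages : List (List (String × String))) (out : List (String × Int)) : Decidable (Spec_get_message_summary messages out) := by unfold Spec_get_message_summary; infer_instance

-- ===== CLAIM (what is proved, stated in full; the proofs are below) =====
def Claim_equal_get_message_summary : Prop := ∀ (messages : List (List (String × String))), Dom_get_message_summary messages → Spec_get_message_summary messages (get_message_summary messages)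

-- ===== LEMMAS AND PROOFS =====

-- ===== VERDICT (by name: the statement is the Claim_ definition above) =====
theorem altLoop_eq (ms : List (List (String × String))) :
    ∀ u a s : Int, altLoop ms u a s =
      (ms.foldl (fun acc m => acc + (if pvDictGet m "role" == some "user" then 1 else 0)) u,
       ms.foldl (fun acc m => acc + (if pvDictGet m "role" == some "assistant" then 1 else 0)) a,
       ms.foldl (fun acc m => acc + (if m.any (fun p => p.1 == "structured_data") then 1 else 0)) s) := by
  induction ms with
  | nil => intro u a s; simp [altLoop]
  | cons m rest ih =>
      intro u a s
      simp only [altLoop, List.foldl]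
      rw [ih]
      by_cases hu : pvDictGet m "role" == some "user" <;>
        by_cases ha : pvDictGet m "role" == some "assistant" <;>
        by_cases hs : m.any (fun p => p.1 == "structured_data") <;>
        simp_all

theorem get_message_summary_spec : Claim_equal_get_message_summary := by
  intro messages _
  unfold Spec_get_message_summary get_message_summary get_message_summary_alt
  rw [altLoop_eq]
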